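-- pv_equiv track=rewrite | github.com/hirosuzuki/procon | atcoder/abc077/c.py | solve
-- ===== SOURCE A (Python) =====
-- def solve(N, A, B, C):
--     A.sort()
--     B.sort()
--     C.sort()
--     def calc(xs, ys, ts):
--         rs = [0] * N
--         t = 0
--         j = N - 1
--         for i in range(N - 1, -1, -1):
--             x = xs[i]
--             while x < ys[j] and j >= 0:
--                 t += ts[j]
--                 j -= 1
--             rs[i] = t
--         return rs
--     rs = [1] * N
--     rs = calc(B, C, rs)
--     rs = calc(A, B, rs)
--     return sum(rs)
-- ===== SOURCE B (Python) =====
-- from bisect import bisect_left, bisect_right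
--
--
-- def solve(N, A, B, C):
--     A.sort()
--     B.sort()
--     C.sort()
--     total = 0
--     for i in range(N):
--         b = B[i]
--         total += bisect_left(A, b, 0, N) * (N - bisect_right(C, b, 0, N))
--     return total
-- ===== Notes on version B (the rewrite author's own statement) =====
-- stated objective: alternative
-- what changed: Replaced the two reverse weighted two-pointer merge passes (building an auxiliary rs array twice and summing it) by a single loop over B that counts smaller A's and larger C's with bounded binary searches and accumulates the product; same sort-dominated cost, no auxiliary array.
import Mathlib
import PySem

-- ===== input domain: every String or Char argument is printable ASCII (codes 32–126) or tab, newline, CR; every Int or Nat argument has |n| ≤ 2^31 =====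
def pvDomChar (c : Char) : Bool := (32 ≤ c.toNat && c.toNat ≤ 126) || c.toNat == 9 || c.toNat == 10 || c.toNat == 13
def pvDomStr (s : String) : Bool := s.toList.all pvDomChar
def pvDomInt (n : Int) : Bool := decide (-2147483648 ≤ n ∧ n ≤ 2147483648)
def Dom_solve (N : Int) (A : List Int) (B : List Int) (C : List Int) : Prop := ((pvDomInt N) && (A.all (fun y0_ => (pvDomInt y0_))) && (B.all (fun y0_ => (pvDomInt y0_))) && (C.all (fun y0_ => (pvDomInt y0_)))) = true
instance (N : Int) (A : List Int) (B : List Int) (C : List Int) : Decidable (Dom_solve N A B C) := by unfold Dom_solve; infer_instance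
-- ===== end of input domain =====

-- B replaces A's two reverse weighted two-pointer passes by per-element binary searches
-- (same sort-dominated cost); both versions sort the argument lists in place, the
-- equivalence proved here is about the RETURN value (the mutation is identical anyway).

-- ===== PORT A =====
-- the inner `while x < ys[j] and j >= 0` loop (state: t, j)
def innerA (ys ts : List Int) (x : Int) (t : Int) (j : Int) : Int × Int :=
  if x < PySem.List.pyGetD ys j 0 ∧ 0 ≤ j then
    innerA ys ts x (t + PySem.List.pyGetD ts j 0) (j - 1)
  else
    (t, j)
termination_by (j + 1).toNat
decreasing_by omega

-- one iteration of the `for i in range(N-1, -1, -1)` loop (state: rs, t, j)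
def stepA (xs ys ts : List Int) (st : List Int × Int × Int) (i : Int) : List Int × Int × Int :=
  let x := PySem.List.pyGetD xs i 0
  let r := innerA ys ts x st.2.1 st.2.2
  (PySem.List.pySetD st.1 i r.1, r.1, r.2)

-- the nested function calc(xs, ys, ts)
def calcA (N : Int) (xs ys ts : List Int) : List Int :=
  ((PySem.List.pyRange (N - 1) (-1) (-1)).foldl (stepA xs ys ts)
    (List.replicate N.toNat 0, 0, N - 1)).1

def solve (N : Int) (A : List Int) (B : List Int) (C : List Int) : Int :=
  let A' := PySem.List.sorted A (fun v => v)
  let B' := PySem.List.sorted B (fun v => v)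
  let C' := PySem.List.sorted C (fun v => v)
  let rs0 := List.replicate N.toNat (1 : Int)
  let rs1 := calcA N B' C' rs0
  let rs2 := calcA N A' B' rs1
  rs2.sum

-- ===== PORT B =====
-- bisect_left(A, b, 0, N) / bisect_right(C, b, 0, N) are the stdlib bisections of the
-- first-N prefix; ported as PySem.List.bisectLeft / bisectRight on `take N`.
def solve_alt (N : Int) (A : List Int) (B : List Int) (C : List Int) : Int :=
  let A' := PySem.List.sorted A (fun v => v)
  let B' := PySem.List.sorted B (fun v => v)
  let C' := PySem.List.sorted C (fun v => v)
  (PySem.List.pyRange 0 N 1).foldl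
    (fun total i =>
      let b := PySem.List.pyGetD B' i 0
      total + (PySem.List.bisectLeft (A'.take N.toNat) b : Int) *
        (N - (PySem.List.bisectRight (C'.take N.toNat) b : Int))) 0

-- ===== PRECONDITION & SPEC =====
-- Pre_: exactly the inputs where A returns normally — with 0 < N, A indexes the first N
-- elements of each list, so each list must have length ≥ N (for N ≤ 0 A returns 0 and the
-- bound holds trivially); nothing else is excluded.
def Pre_solve (N : Int) (A : List Int) (B : List Int) (C : List Int) : Prop :=
  N ≤ (A.length : Int) ∧ N ≤ (B.length : Int) ∧ N ≤ (C.length : Int)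
instance (N : Int) (A : List Int) (B : List Int) (C : List Int) : Decidable (Pre_solve N A B C) := by
  unfold Pre_solve; infer_instance

def pvWitness_solve : Int × List Int × List Int × List Int := (2, [3, 1], [2, 4], [5, 0])

def Spec_solve (N : Int) (A : List Int) (B : List Int) (C : List Int) (out : Int) : Prop := out = solve_alt N A B C
instance (N : Int) (A : List Int) (B : List Int) (C : List Int) (out : Int) : Decidable (Spec_solve N A B C out) := by unfold Spec_solve; infer_instance

-- ===== CLAIM (what is proved, stated in full; the proofs are below) =====
def Claim_equal_solve : Prop := ∀ (N : Int) (A : List Int) (B : List Int) (C : List Int), Dom_solve N A B C → Pre_solve N A B C → Spec_solve N A B C (solve N A B C)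

-- ===== LEMMAS AND PROOFS =====

def TS (ts : List Int) (n : Nat) (j : Int) : Int :=
  ∑ k ∈ Finset.range n, if j < (k : Int) then ts.getD k 0 else 0

def WS (ys ts : List Int) (n : Nat) (x : Int) : Int :=
  ∑ k ∈ Finset.range n, if x < ys.getD k 0 then ts.getD k 0 else 0

def CNT (ys : List Int) (n : Nat) (x : Int) : Int :=
  ∑ k ∈ Finset.range n, if x < ys.getD k 0 then 1 else 0

def LCNT (xs : List Int) (n : Nat) (b : Int) : Int :=
  ∑ i ∈ Finset.range n, if xs.getD i 0 < b then 1 else 0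

lemma TS_top (ts : List Int) (n : Nat) (j : Int) (h : ∀ k : Nat, k < n → ¬ j < (k : Int)) :
    TS ts n j = 0 := by
  unfold TS
  apply Finset.sum_eq_zero
  intro k hk
  simp [h k (Finset.mem_range.mp hk)]

lemma TS_pred (ts : List Int) (n : Nat) (j : Int) (h0 : 0 ≤ j) (hj : j < (n : Int)) :
    TS ts n (j - 1) = TS ts n j + ts.getD j.toNat 0 := by
  unfold TS
  have hjn : j.toNat ∈ Finset.range n := by simp; omega
  rw [← Finset.sum_erase_add _ _ hjn, ← Finset.sum_erase_add _ _ hjn]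
  have h1 : (if j - 1 < (j.toNat : Int) then ts.getD j.toNat 0 else 0) = ts.getD j.toNat 0 := by
    rw [if_pos]; omega
  have h2 : (if j < (j.toNat : Int) then ts.getD j.toNat 0 else 0) = 0 := by
    rw [if_neg]; omega
  rw [h1, h2, add_zero]
  congr 1
  apply Finset.sum_congr rfl
  intro k hk
  have hk' : k ≠ j.toNat := (Finset.mem_erase.mp hk).1
  congr 1
  simp only [eq_iff_iff]
  omega

lemma pairwise_getD_mono (xs : List Int) (hxs : xs.Pairwise (· ≤ ·)) (p q : Nat)
    (hpq : p ≤ q) (hq : q < xs.length) : xs.getD p 0 ≤ xs.getD q 0 := by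
  rcases eq_or_lt_of_le hpq with h | h
  · subst h; rfl
  · rw [List.getD_eq_getElem _ _ (lt_of_le_of_lt hpq hq), List.getD_eq_getElem _ _ hq]
    exact (List.pairwise_iff_getElem.mp hxs) p q _ hq h

lemma sum_eq_sum_getD (l : List Int) :
    l.sum = ∑ i ∈ Finset.range l.length, l.getD i 0 := by
  induction l using List.reverseRecOn with
  | nil => simp
  | append_singleton xs x ih =>
      simp only [List.sum_append, List.length_append, List.sum_cons, List.sum_nil,
        List.length_singleton]
      rw [Finset.sum_range_succ, ih]
      congr 1
      · apply Finset.sum_congr rfl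
        intro i hi
        have hi' := Finset.mem_range.mp hi
        rw [List.getD_eq_getElem _ _ hi', List.getD_eq_getElem _ _ (by simp; omega : i < (xs ++ [x]).length), List.getElem_append_left hi']
      · simp

lemma sum_ite_lt (L b : Nat) (hb : b ≤ L) :
    (∑ i ∈ Finset.range L, if i < b then (1 : Int) else 0) = (b : Int) := by
  rw [← Finset.sum_subset (by intro i hi; simp only [Finset.mem_range] at hi ⊢; omega : Finset.range b ⊆ Finset.range L)]
  · rw [Finset.sum_ite_of_true (by intro i hi; exact Finset.mem_range.mp hi)]
    simp
  · intro i hi hni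
    simp only [Finset.mem_range] at hi hni
    rw [if_neg]; omega

lemma bisectLeft_count (xs : List Int) (x : Int) (hp : xs.Pairwise (· ≤ ·)) :
    ((PySem.List.bisectLeft xs x : Nat) : Int) =
      ∑ i ∈ Finset.range xs.length, if xs.getD i 0 < x then 1 else 0 := by
  obtain ⟨hle, hlt, hge⟩ := PySem.List.bisectLeft_spec xs x hp
  rw [Finset.sum_congr rfl (fun i hi => ?_), sum_ite_lt _ _ hle]
  have hi' := Finset.mem_range.mp hi
  rw [List.getD_eq_getElem _ _ hi']
  congr 1
  simp only [eq_iff_iff]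
  constructor
  · intro h
    by_contra hn
    exact absurd (hge i hi' (by omega)) (by omega)
  · exact fun h => hlt i hi' h

lemma bisectRight_count (xs : List Int) (x : Int) (hp : xs.Pairwise (· ≤ ·)) :
    ((xs.length : Int) - (PySem.List.bisectRight xs x : Nat)) =
      ∑ i ∈ Finset.range xs.length, if x < xs.getD i 0 then 1 else 0 := by
  obtain ⟨hle, hlt, hge⟩ := PySem.List.bisectRight_spec xs x hp
  have : ∀ i ∈ Finset.range xs.length,
      (if x < xs.getD i 0 then (1:Int) else 0) = (if i < PySem.List.bisectRight xs x then 0 else 1) := by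
    intro i hi
    have hi' := Finset.mem_range.mp hi
    rw [List.getD_eq_getElem _ _ hi']
    by_cases h : i < PySem.List.bisectRight xs x
    · rw [if_neg (by exact not_lt.mpr (hlt i hi' h)), if_pos h]
    · rw [if_pos (hge i hi' (by omega)), if_neg h]
  rw [Finset.sum_congr rfl this]
  have h2 : ∀ i ∈ Finset.range xs.length,
      (if i < PySem.List.bisectRight xs x then (0:Int) else 1) = 1 - (if i < PySem.List.bisectRight xs x then 1 else 0) := by
    intro i _; by_cases h : i < PySem.List.bisectRight xs x <;> simp [h]
  rw [Finset.sum_congr rfl h2, Finset.sum_sub_distrib, sum_ite_lt _ _ hle]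
  simp

lemma innerA_spec (ys ts : List Int) (N : Int) (x : Int) :
    ∀ t j : Int, -1 ≤ j → j < N → t = TS ts N.toNat j →
      (∀ k : Nat, j < (k : Int) → (k : Int) < N → x < ys.getD k 0) →
      ∃ j', innerA ys ts x t j = (TS ts N.toNat j', j') ∧ -1 ≤ j' ∧ j' ≤ j ∧
        (∀ k : Nat, j' < (k : Int) → (k : Int) < N → x < ys.getD k 0) ∧
        (0 ≤ j' → ¬ x < ys.getD j'.toNat 0) := by
  intro t j
  induction t, j using innerA.induct ys ts x with
  | case1 t j hcond ih =>
      intro h1 h2 ht habove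
      rw [innerA, if_pos hcond]
      obtain ⟨hx, hj0⟩ := hcond
      rw [PySem.List.pyGetD_of_nonneg ys 0 hj0] at hx
      have hjn : j < ((N.toNat : Nat) : Int) := by omega
      obtain ⟨j', heq, hj'1, hj'2, hab', hexit⟩ := ih (by omega) (by omega)
        (by rw [ht, PySem.List.pyGetD_of_nonneg ts 0 hj0, TS_pred ts N.toNat j hj0 hjn])
        (by
          intro k hk1 hk2
          by_cases hkj : j < (k : Int)
          · exact habove k hkj hk2
          · have : k = j.toNat := by omega
            subst this
            exact hx)
      exact ⟨j', heq, hj'1, by omega, hab', hexit⟩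
  | case2 t j hcond =>
      intro h1 h2 ht habove
      rw [innerA, if_neg hcond]
      refine ⟨j, by rw [ht], h1, le_refl _, habove, fun hj0 h => ?_⟩
      exact hcond ⟨by rwa [PySem.List.pyGetD_of_nonneg ys 0 hj0], hj0⟩

lemma outer_spec_aux (xs ys ts : List Int) (N : Int)
    (hxs : xs.Pairwise (· ≤ ·)) (hys : ys.Pairwise (· ≤ ·))
    (hxlen : N ≤ (xs.length : Int)) (hylen : N ≤ (ys.length : Int)) :
    ∀ (fuel : Nat) (a : Int) (rs : List Int) (t j : Int), (a + 1).toNat ≤ fuel →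
      -1 ≤ a → a < N →
      rs.length = N.toNat → -1 ≤ j → j < N → t = TS ts N.toNat j →
      (0 ≤ a → ∀ k : Nat, j < (k : Int) → (k : Int) < N → xs.getD a.toNat 0 < ys.getD k 0) →
      ((PySem.List.pyRange a (-1) (-1)).foldl (stepA xs ys ts) (rs, t, j)).1.length = N.toNat ∧
      ∀ i : Nat, (i : Int) < N →
        ((PySem.List.pyRange a (-1) (-1)).foldl (stepA xs ys ts) (rs, t, j)).1.getD i 0 =
          if (i : Int) ≤ a then WS ys ts N.toNat (xs.getD i 0) else rs.getD i 0 := by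
  intro fuel
  induction fuel with
  | zero =>
      intro a rs t j hfuel ha1 ha2 hlen hj1 hj2 ht habove
      have ha : a = -1 := by omega
      subst ha
      rw [PySem.List.pyRange_neg_one_eq_nil (by omega)]
      refine ⟨hlen, fun i hi => ?_⟩
      rw [if_neg (by omega)]; rfl
  | succ f ihf =>
      intro a rs t j hfuel ha1 ha2 hlen hj1 hj2 ht habove
      by_cases ha0 : 0 ≤ a
      case neg =>
        have ha : a = -1 := by omega
        subst ha
        rw [PySem.List.pyRange_neg_one_eq_nil (by omega)]
        refine ⟨hlen, fun i hi => ?_⟩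
        rw [if_neg (by omega)]; rfl
      case pos =>
        have hN0 : 0 < N := by omega
        rw [PySem.List.pyRange_neg_one_cons (by omega : (-1:Int) < a), List.foldl_cons]
        set x := xs.getD a.toNat 0 with hx
        obtain ⟨j', heq, hj'1, hj'2, hab', hexit⟩ :=
          innerA_spec ys ts N x t j hj1 hj2 ht (habove ha0)
        have hstep : stepA xs ys ts (rs, t, j) a =
            (rs.set a.toNat (TS ts N.toNat j'), TS ts N.toNat j', j') := by
          show (PySem.List.pySetD rs a (innerA ys ts (PySem.List.pyGetD xs a 0) t j).1,
                (innerA ys ts (PySem.List.pyGetD xs a 0) t j).1,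
                (innerA ys ts (PySem.List.pyGetD xs a 0) t j).2) = _
          rw [PySem.List.pyGetD_of_nonneg xs 0 ha0, ← hx, heq,
            PySem.List.pySetD_of_nonneg rs _ ha0]
        rw [hstep]
        -- the value written at index a is WS of x
        have hws : TS ts N.toNat j' = WS ys ts N.toNat x := by
          unfold TS WS
          apply Finset.sum_congr rfl
          intro k hk
          have hk' := Finset.mem_range.mp hk
          congr 1
          simp only [eq_iff_iff]
          constructor
          · intro h
            exact hab' k h (by omega)
          · intro h
            by_contra hn
            have hj'0 : 0 ≤ j' := by omega
            have hkj : k ≤ j'.toNat := by omega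
            have := pairwise_getD_mono ys hys k j'.toNat hkj (by omega)
            exact hexit hj'0 (lt_of_lt_of_le h this)
        obtain ⟨ihlen, ihget⟩ := ihf (a - 1) (rs.set a.toNat (TS ts N.toNat j'))
          (TS ts N.toNat j') j' (by omega) (by omega) (by omega)
          (by rw [List.length_set]; exact hlen) hj'1 (by omega) rfl
          (by
            intro ha0' k hk1 hk2
            have h1 : xs.getD (a-1).toNat 0 ≤ x := by
              rw [hx]
              exact pairwise_getD_mono xs hxs (a-1).toNat a.toNat (by omega) (by omega)
            exact lt_of_le_of_lt h1 (hab' k hk1 hk2))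
        refine ⟨ihlen, fun i hi => ?_⟩
        rw [ihget i hi]
        by_cases hia : (i : Int) ≤ a - 1
        · rw [if_pos hia, if_pos (by omega)]
        · by_cases hia2 : (i : Int) ≤ a
          · have hieq : i = a.toNat := by omega
            subst hieq
            rw [if_neg hia, if_pos hia2,
              List.getD_eq_getElem _ _ (by rw [List.length_set]; omega),
              List.getElem_set_self, hws]
          · rw [if_neg hia, if_neg hia2,
              List.getD_eq_getElem _ _ (by rw [List.length_set]; omega),
              List.getD_eq_getElem _ _ (by omega),
              List.getElem_set_ne (by omega)]

lemma calc_spec (xs ys ts : List Int) (N : Int)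
    (hxs : xs.Pairwise (· ≤ ·)) (hys : ys.Pairwise (· ≤ ·))
    (hxlen : N ≤ (xs.length : Int)) (hylen : N ≤ (ys.length : Int)) (hN : 0 < N) :
    (calcA N xs ys ts).length = N.toNat ∧
    ∀ i : Nat, (i : Int) < N → (calcA N xs ys ts).getD i 0 = WS ys ts N.toNat (xs.getD i 0) := by
  obtain ⟨h1, h2⟩ := outer_spec_aux xs ys ts N hxs hys hxlen hylen
    N.toNat (N - 1) (List.replicate N.toNat 0) 0 (N - 1)
    (by omega) (by omega) (by omega) (by simp) (by omega) (by omega)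
    ((TS_top ts N.toNat (N - 1) (by intro k hk; omega)).symm)
    (by intro _ k hk1 hk2; omega)
  exact ⟨h1, fun i hi => by rw [calcA, h2 i hi, if_pos (by omega)]⟩

-- zero case

lemma solve_zero (N : Int) (A B C : List Int) (hN : N ≤ 0) :
    solve N A B C = 0 ∧ solve_alt N A B C = 0 := by
  constructor
  · show (calcA N _ _ _).sum = 0
    rw [calcA, PySem.List.pyRange_neg_one_eq_nil (by omega), List.foldl_nil]
    simp [Int.toNat_of_nonpos hN]
  · show (PySem.List.pyRange 0 N 1).foldl _ 0 = 0
    rw [PySem.List.pyRange_one_eq_nil hN, List.foldl_nil]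

lemma solve_eq (N : Int) (A B C : List Int)
    (hpre : N ≤ (A.length : Int) ∧ N ≤ (B.length : Int) ∧ N ≤ (C.length : Int)) :
    solve N A B C = solve_alt N A B C := by
  by_cases hN : N ≤ 0
  · obtain ⟨h1, h2⟩ := solve_zero N A B C hN
    rw [h1, h2]
  rw [not_le] at hN
  set A' := PySem.List.sorted A (fun v => v) with hA'
  set B' := PySem.List.sorted B (fun v => v) with hB'
  set C' := PySem.List.sorted C (fun v => v) with hC'
  have hpA : A'.Pairwise (· ≤ ·) := PySem.List.sorted_pairwise A (fun v => v)
  have hpB : B'.Pairwise (· ≤ ·) := PySem.List.sorted_pairwise B (fun v => v)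
  have hpC : C'.Pairwise (· ≤ ·) := PySem.List.sorted_pairwise C (fun v => v)
  have hlA : N ≤ (A'.length : Int) := by rw [hA', PySem.List.length_sorted]; exact hpre.1
  have hlB : N ≤ (B'.length : Int) := by rw [hB', PySem.List.length_sorted]; exact hpre.2.1
  have hlC : N ≤ (C'.length : Int) := by rw [hC', PySem.List.length_sorted]; exact hpre.2.2
  set n := N.toNat with hn
  have hNn : N = (n : Int) := by omega
  -- rs1
  obtain ⟨hlen1, hget1⟩ := calc_spec B' C' (List.replicate n 1) N hpB hpC hlB hlC hN
  set rs1 := calcA N B' C' (List.replicate n 1) with hrs1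
  have hget1' : ∀ k : Nat, k < n → rs1.getD k 0 = CNT C' n (B'.getD k 0) := by
    intro k hk
    rw [hget1 k (by omega)]
    unfold WS CNT
    apply Finset.sum_congr rfl
    intro m hm
    have hm' := Finset.mem_range.mp hm
    have hrep : (List.replicate n (1:Int)).getD m 0 = 1 := List.getD_replicate 1 (by omega)
    rw [hrep]
  -- rs2
  obtain ⟨hlen2, hget2⟩ := calc_spec A' B' rs1 N hpA hpB hlA hlB hN
  -- LHS
  have hL : solve N A B C =
      ∑ i ∈ Finset.range n, WS B' rs1 n (A'.getD i 0) := by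
    show (calcA N A' B' rs1).sum = _
    rw [sum_eq_sum_getD, hlen2]
    exact Finset.sum_congr rfl (fun i hi => hget2 i (by have := Finset.mem_range.mp hi; omega))
  -- WS with rs1 values
  have hWS : ∀ x : Int, WS B' rs1 n x =
      ∑ k ∈ Finset.range n, if x < B'.getD k 0 then CNT C' n (B'.getD k 0) else 0 := by
    intro x
    unfold WS
    apply Finset.sum_congr rfl
    intro k hk
    have hk' := Finset.mem_range.mp hk
    rw [hget1' k hk']
  -- RHS
  have htakeA : (A'.take n).length = n := by rw [List.length_take]; omega
  have htakeC : (C'.take n).length = n := by rw [List.length_take]; omega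
  have hgetTA : ∀ i : Nat, i < n → (A'.take n).getD i 0 = A'.getD i 0 := by
    intro i hi
    rw [List.getD_eq_getElem _ _ (by omega), List.getD_eq_getElem _ _ (by omega),
      List.getElem_take]
  have hgetTC : ∀ i : Nat, i < n → (C'.take n).getD i 0 = C'.getD i 0 := by
    intro i hi
    rw [List.getD_eq_getElem _ _ (by omega), List.getD_eq_getElem _ _ (by omega),
      List.getElem_take]
  have hbl : ∀ b : Int, ((PySem.List.bisectLeft (A'.take n) b : Nat) : Int) = LCNT A' n b := by
    intro b
    rw [bisectLeft_count _ _ (hpA.take), htakeA]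
    exact Finset.sum_congr rfl (fun i hi => by
      rw [hgetTA i (Finset.mem_range.mp hi)])
  have hbr : ∀ b : Int, N - ((PySem.List.bisectRight (C'.take n) b : Nat) : Int) = CNT C' n b := by
    intro b
    have := bisectRight_count (C'.take n) b (hpC.take)
    rw [htakeC] at this
    rw [hNn, this]
    exact Finset.sum_congr rfl (fun i hi => by
      rw [hgetTC i (Finset.mem_range.mp hi)])
  have hR : solve_alt N A B C =
      ∑ k ∈ Finset.range n, LCNT A' n (B'.getD k 0) * CNT C' n (B'.getD k 0) := by
    show (PySem.List.pyRange 0 N 1).foldl _ 0 = _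
    rw [PySem.List.foldl_add _ (fun i =>
      (PySem.List.bisectLeft (A'.take N.toNat) (PySem.List.pyGetD B' i 0) : Int) *
        (N - (PySem.List.bisectRight (C'.take N.toNat) (PySem.List.pyGetD B' i 0) : Int))) 0]
    rw [hNn, PySem.List.pyRange_zero_nat n, List.map_map]
    rw [zero_add]
    show ∑ k ∈ Finset.range n, _ = _
    apply Finset.sum_congr rfl
    intro k hk
    have hk' := Finset.mem_range.mp hk
    simp only [Function.comp]
    rw [PySem.List.pyGetD_natCast, ← hNn, hbl, hbr]
  rw [hL, hR]
  -- double sum swap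
  have hswap : ∀ i k : Nat,
      (if A'.getD i 0 < B'.getD k 0 then CNT C' n (B'.getD k 0) else 0) =
      (if A'.getD i 0 < B'.getD k 0 then (1:Int) else 0) * CNT C' n (B'.getD k 0) := by
    intro i k
    by_cases h : A'.getD i 0 < B'.getD k 0 <;> simp
  calc ∑ i ∈ Finset.range n, WS B' rs1 n (A'.getD i 0)
      = ∑ i ∈ Finset.range n, ∑ k ∈ Finset.range n,
          (if A'.getD i 0 < B'.getD k 0 then (1:Int) else 0) * CNT C' n (B'.getD k 0) := by
        apply Finset.sum_congr rfl
        intro i _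
        rw [hWS]
        exact Finset.sum_congr rfl (fun k _ => hswap i k)
    _ = ∑ k ∈ Finset.range n, ∑ i ∈ Finset.range n,
          (if A'.getD i 0 < B'.getD k 0 then (1:Int) else 0) * CNT C' n (B'.getD k 0) :=
        Finset.sum_comm
    _ = ∑ k ∈ Finset.range n, LCNT A' n (B'.getD k 0) * CNT C' n (B'.getD k 0) := by
        apply Finset.sum_congr rfl
        intro k _
        rw [← Finset.sum_mul]
        rfl

-- ===== VERDICT (by name: the statement is the Claim_ definition above) =====
theorem solve_spec : Claim_equal_solve := by
  intro N A B C _ hpre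
  exact solve_eq N A B C hpre
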